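-- pv_equiv track=rewrite | github.com/DevAmarnadh/ACC | engine/content_generator.py | _classify_content
-- ===== SOURCE A (Python) =====
-- from typing import Dict, List, Optional
--
-- def _classify_content(topic: str, context: Optional[str] = None) -> str:
--     """Automatically classify content into appropriate category"""
--     topic_lower = topic.lower()
--     context_lower = (context or "").lower()
--     combined = f"{topic_lower} {context_lower}"
--
--     # Classification rules
--     if any(word in combined for word in ['new', 'just released', 'launched', 'introducing', 'announcement']):
--         if any(word in combined for word in ['tool', 'app', 'platform', 'software']):
--             return 'new_tool_intro'
--
--     if any(word in combined for word in ['how to', 'tutorial', 'guide', 'step by step', 'learn']):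
--         return 'tool_detailed_tutorial'
--
--     if any(word in combined for word in ['model', 'gpt', 'llm', 'ai model', 'neural network']):
--         return 'trending_ai_model'
--
--     if any(word in combined for word in ['news', 'breaking', 'trending', 'latest', 'update']):
--         return 'ai_trending_news'
--
--     if any(word in combined for word in ['github', 'open source', 'repository', 'repo', 'code']):
--         return 'github_open_source_repo'
--
--     if any(word in combined for word in ['tip', 'trick', 'quick', 'simple', 'easy']):
--         return 'instagram_engagement_content'
--
--     # Default to new tool intro if unclear
--     return 'new_tool_intro'
-- ===== SOURCE B (Python) =====
-- from typing import Optional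
--
-- # One flat keyword table tagging each keyword: -1 = "new"-word, -2 = "tool"-word,
-- # 1..5 = rank of the simple single-group rules (in A's check order).
-- _NEW_WORDS = ['new', 'just released', 'launched', 'introducing', 'announcement']
-- _TOOL_WORDS = ['tool', 'app', 'platform', 'software']
-- _RANKED = [
--     (['how to', 'tutorial', 'guide', 'step by step', 'learn'], 1),
--     (['model', 'gpt', 'llm', 'ai model', 'neural network'], 2),
--     (['news', 'breaking', 'trending', 'latest', 'update'], 3),
--     (['github', 'open source', 'repository', 'repo', 'code'], 4),
--     (['tip', 'trick', 'quick', 'simple', 'easy'], 5),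
-- ]
-- _KEYWORDS = ([(w, -1) for w in _NEW_WORDS]
--              + [(w, -2) for w in _TOOL_WORDS]
--              + [(w, r) for ws, r in _RANKED for w in ws])
-- _CATEGORIES = {1: 'tool_detailed_tutorial', 2: 'trending_ai_model',
--                3: 'ai_trending_news', 4: 'github_open_source_repo',
--                5: 'instagram_engagement_content'}
--
-- def _classify_content(topic: str, context: Optional[str] = None) -> str:
--     """One pass over a flat keyword table accumulating (has_new, has_tool, best
--     rank); then select: conjunction rule first, else the best-ranked rule,
--     else the default."""
--     combined = f"{topic.lower()} {(context or '').lower()}"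
--     has_new = has_tool = False
--     best = 6  # sentinel: no ranked rule matched
--     for word, tag in _KEYWORDS:
--         if word in combined:
--             if tag == -1:
--                 has_new = True
--             elif tag == -2:
--                 has_tool = True
--             elif tag < best:
--                 best = tag
--     if (has_new and has_tool) or best == 6:
--         return 'new_tool_intro'
--     return _CATEGORIES[best]
-- ===== Notes on version B (the rewrite author's own statement) =====
-- stated objective: alternative
-- what changed: Replaced A's ordered chain of if/any keyword checks by a collect-then-select algorithm: one accumulating pass over a single flat tagged keyword table (recording has_new, has_tool and the minimum rank of any matching simple rule), then one final selection (conjunction rule, else the best-ranked category, else the default).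
import Mathlib
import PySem

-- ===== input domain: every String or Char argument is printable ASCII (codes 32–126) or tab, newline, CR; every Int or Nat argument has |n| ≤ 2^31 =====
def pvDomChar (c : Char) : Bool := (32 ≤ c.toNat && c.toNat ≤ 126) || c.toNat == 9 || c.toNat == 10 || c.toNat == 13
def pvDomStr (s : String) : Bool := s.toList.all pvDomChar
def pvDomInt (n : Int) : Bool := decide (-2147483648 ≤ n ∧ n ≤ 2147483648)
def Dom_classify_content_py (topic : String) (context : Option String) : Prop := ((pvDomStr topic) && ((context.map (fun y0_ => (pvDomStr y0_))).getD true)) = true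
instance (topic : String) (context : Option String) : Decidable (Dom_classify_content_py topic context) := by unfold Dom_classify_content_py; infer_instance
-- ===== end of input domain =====

-- B replaces A's ordered chain of any-checks by one accumulating pass over a flat
-- tagged keyword table followed by a min-rank selection (objective: alternative).

-- ===== PORT A =====
-- literal transliteration of A's chain of if/any checks; the nested first check
-- falls through to the remaining checks, written as 'rest'
def classify_content_py (topic : String) (context : Option String) : String :=
  let topic_lower := PySem.Str.lower topic
  let context_lower := PySem.Str.lower (context.getD "")
  let combined := topic_lower ++ " " ++ context_lower
  let rest :=
    if ["how to", "tutorial", "guide", "step by step", "learn"].any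
        (fun w => PySem.Str.isIn w combined) then "tool_detailed_tutorial"
    else if ["model", "gpt", "llm", "ai model", "neural network"].any
        (fun w => PySem.Str.isIn w combined) then "trending_ai_model"
    else if ["news", "breaking", "trending", "latest", "update"].any
        (fun w => PySem.Str.isIn w combined) then "ai_trending_news"
    else if ["github", "open source", "repository", "repo", "code"].any
        (fun w => PySem.Str.isIn w combined) then "github_open_source_repo"
    else if ["tip", "trick", "quick", "simple", "easy"].any
        (fun w => PySem.Str.isIn w combined) then "instagram_engagement_content"
    else "new_tool_intro"
  if ["new", "just released", "launched", "introducing", "announcement"].any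
      (fun w => PySem.Str.isIn w combined) then
    if ["tool", "app", "platform", "software"].any
        (fun w => PySem.Str.isIn w combined) then "new_tool_intro"
    else rest
  else rest

-- ===== PORT B =====
-- keyword groups of Source B
def pvNewWords : List String := ["new", "just released", "launched", "introducing", "announcement"]
def pvToolWords : List String := ["tool", "app", "platform", "software"]
def pvG1 : List String := ["how to", "tutorial", "guide", "step by step", "learn"]
def pvG2 : List String := ["model", "gpt", "llm", "ai model", "neural network"]
def pvG3 : List String := ["news", "breaking", "trending", "latest", "update"]
def pvG4 : List String := ["github", "open source", "repository", "repo", "code"]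
def pvG5 : List String := ["tip", "trick", "quick", "simple", "easy"]

-- _KEYWORDS: flat tagged table, built exactly as Source B builds it
def pvKeywords : List (String × Int) :=
  pvNewWords.map (fun w => (w, (-1 : Int))) ++
  pvToolWords.map (fun w => (w, (-2 : Int))) ++
  (pvG1.map (fun w => (w, (1 : Int))) ++ pvG2.map (fun w => (w, (2 : Int))) ++
   pvG3.map (fun w => (w, (3 : Int))) ++ pvG4.map (fun w => (w, (4 : Int))) ++
   pvG5.map (fun w => (w, (5 : Int))))

def pvCategories : PySem.Dict Int String :=
  PySem.Dict.ofList [(1, "tool_detailed_tutorial"), (2, "trending_ai_model"),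
    (3, "ai_trending_news"), (4, "github_open_source_repo"),
    (5, "instagram_engagement_content")]

-- the loop body of Source B: state = (has_new, has_tool, best)
def pvStep (combined : String) (s : Bool × Bool × Int) (p : String × Int) : Bool × Bool × Int :=
  if PySem.Str.isIn p.1 combined then
    if p.2 == -1 then (true, s.2.1, s.2.2)
    else if p.2 == -2 then (s.1, true, s.2.2)
    else if p.2 < s.2.2 then (s.1, s.2.1, p.2)
    else s
  else s

def classify_content_py_alt (topic : String) (context : Option String) : String :=
  let combined := PySem.Str.lower topic ++ " " ++ PySem.Str.lower (context.getD "")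
  let s := pvKeywords.foldl (pvStep combined) (false, false, 6)
  if (s.1 && s.2.1) || s.2.2 == 6 then "new_tool_intro"
  else
    -- _CATEGORIES[best]: the key is always present here (best ∈ 1..5), so the
    -- KeyError branch of Python's indexing is unreachable; none is mapped to a default
    (PySem.Dict.get? pvCategories s.2.2).getD "new_tool_intro"

-- ===== PRECONDITION & SPEC =====
def Spec_classify_content_py (topic : String) (context : Option String) (out : String) : Prop := out = classify_content_py_alt topic context
instance (topic : String) (context : Option String) (out : String) : Decidable (Spec_classify_content_py topic context out) := by unfold Spec_classify_content_py; infer_instance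

-- ===== CLAIM (what is proved, stated in full; the proofs are below) =====
def Claim_equal_classify_content_py : Prop := ∀ (topic : String) (context : Option String), Dom_classify_content_py topic context → Spec_classify_content_py topic context (classify_content_py topic context)

-- ===== LEMMAS AND PROOFS =====

-- folding a '-1'-tagged group only ORs the group's any-match into has_new
theorem pv_foldN (c : String) (ws : List String) (n t : Bool) (b : Int) :
    List.foldl (pvStep c) (n, t, b) (ws.map (fun w => (w, (-1 : Int)))) =
      (n || ws.any (fun w => PySem.Str.isIn w c), t, b) := by
  induction ws generalizing n with
  | nil => simp
  | cons w ws ih =>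
    simp only [List.map_cons, List.foldl_cons, pvStep, List.any_cons]
    cases h : PySem.Str.isIn w c <;> simp [ih]

-- folding a '-2'-tagged group only ORs the group's any-match into has_tool
theorem pv_foldT (c : String) (ws : List String) (n t : Bool) (b : Int) :
    List.foldl (pvStep c) (n, t, b) (ws.map (fun w => (w, (-2 : Int)))) =
      (n, t || ws.any (fun w => PySem.Str.isIn w c), b) := by
  induction ws generalizing t with
  | nil => simp
  | cons w ws ih =>
    simp only [List.map_cons, List.foldl_cons, pvStep, List.any_cons]
    cases h : PySem.Str.isIn w c <;> simp [ih]

-- folding a positively ranked group lowers best to min best r iff the group matches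
theorem pv_foldR (c : String) (ws : List String) (r : Int) (hr : 1 ≤ r) (n t : Bool) (b : Int) :
    List.foldl (pvStep c) (n, t, b) (ws.map (fun w => (w, r))) =
      (n, t, if ws.any (fun w => PySem.Str.isIn w c) then (if r < b then r else b) else b) := by
  induction ws generalizing b with
  | nil => simp
  | cons w ws ih =>
    have hr1 : (r == (-1 : Int)) = false := by simp; omega
    have hr2 : (r == (-2 : Int)) = false := by simp; omega
    rw [List.map_cons, List.foldl_cons]
    cases h : PySem.Str.isIn w c
    · have hstep : pvStep c (n, t, b) (w, r) = (n, t, b) := by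
        simp only [pvStep, h, Bool.false_eq_true, if_false]
      rw [hstep, ih]
      simp only [List.any_cons, h, Bool.false_or]
    · have hstep : pvStep c (n, t, b) (w, r) = (n, t, if r < b then r else b) := by
        simp only [pvStep, h, hr1, hr2, if_true, Bool.false_eq_true, if_false]
        split_ifs <;> rfl
      rw [hstep, ih]
      simp only [List.any_cons, h, Bool.true_or, if_true, Prod.mk.injEq, true_and]
      cases hws : ws.any (fun w => PySem.Str.isIn w c) <;>
        simp only [Bool.false_eq_true, if_false, if_true] <;> split_ifs <;> omega

-- ===== VERDICT (by name: the statement is the Claim_ definition above) =====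
theorem classify_content_py_spec : Claim_equal_classify_content_py := by
  intro topic context _
  unfold Spec_classify_content_py classify_content_py classify_content_py_alt
  simp only [pvKeywords, pvNewWords, pvToolWords, pvG1, pvG2, pvG3, pvG4, pvG5,
    List.foldl_append, pv_foldN, pv_foldT, pv_foldR _ _ 1 (by omega),
    pv_foldR _ _ 2 (by omega), pv_foldR _ _ 3 (by omega), pv_foldR _ _ 4 (by omega),
    pv_foldR _ _ 5 (by omega)]
  generalize (["new", "just released", "launched", "introducing", "announcement"] : List String).any _ = bn
  generalize (["tool", "app", "platform", "software"] : List String).any _ = bt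
  generalize (["how to", "tutorial", "guide", "step by step", "learn"] : List String).any _ = b1
  generalize (["model", "gpt", "llm", "ai model", "neural network"] : List String).any _ = b2
  generalize (["news", "breaking", "trending", "latest", "update"] : List String).any _ = b3
  generalize (["github", "open source", "repository", "repo", "code"] : List String).any _ = b4
  generalize (["tip", "trick", "quick", "simple", "easy"] : List String).any _ = b5
  revert bn bt b1 b2 b3 b4 b5
  decide
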